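-- pv_equiv track=rewrite | github.com/signalnine/tildebin | legacy/baremetal_sysctl_drift_detector.py | compare_sysctls
-- ===== SOURCE A (Python) =====
-- PARAM_CATEGORIES = {
--     'network_security': [
--         'net.ipv4.conf.',
--         'net.ipv6.conf.',
--         'net.ipv4.icmp_',
--         'net.ipv4.tcp_syncookies',
--     ],
--     'kernel_security': [
--         'kernel.randomize_va_space',
--         'kernel.kptr_restrict',
--         'kernel.dmesg_restrict',
--         'kernel.perf_event_paranoid',
--         'kernel.yama.',
--         'kernel.sysrq',
--     ],
--     'memory': [
--         'vm.',
--         'kernel.shmmax',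
--         'kernel.shmall',
--     ],
--     'network_performance': [
--         'net.core.',
--         'net.ipv4.tcp_',
--         'net.ipv4.udp_',
--     ],
--     'filesystem': [
--         'fs.',
--     ],
-- }
--
-- def get_category(param):
--     """Determine category for a parameter."""
--     for category, prefixes in PARAM_CATEGORIES.items():
--         for prefix in prefixes:
--             if param.startswith(prefix):
--                 return category
--     return 'other'
--
-- def compare_sysctls(current, baseline, ignore_extra=False):
--     """Compare current sysctls against baseline."""
--     drift = {
--         'changed': [],
--         'missing': [],
--         'extra': [],
--     }
--
--     # Check for changed and missing parameters
--     for key, expected_value in baseline.items():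
--         if key in current:
--             current_value = current[key]
--             # Normalize values for comparison (strip whitespace, handle tabs)
--             norm_current = ' '.join(current_value.split())
--             norm_expected = ' '.join(str(expected_value).split())
--
--             if norm_current != norm_expected:
--                 drift['changed'].append({
--                     'key': key,
--                     'expected': expected_value,
--                     'actual': current_value,
--                     'category': get_category(key),
--                 })
--         else:
--             drift['missing'].append({
--                 'key': key,
--                 'expected': expected_value,
--                 'category': get_category(key),
--             })
--
--     # Check for extra parameters (not in baseline)
--     if not ignore_extra:
--         baseline_keys = set(baseline.keys())
--         for key in current:
--             if key not in baseline_keys: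
--                 # Only report extra if it matches baseline patterns
--                 for baseline_key in baseline_keys:
--                     # Check if same prefix family
--                     prefix = '.'.join(baseline_key.split('.')[:2])
--                     if key.startswith(prefix):
--                         drift['extra'].append({
--                             'key': key,
--                             'value': current[key],
--                             'category': get_category(key),
--                         })
--                         break
--
--     return drift
-- ===== SOURCE B (Python) =====
-- PARAM_CATEGORIES = {
--     'network_security': [
--         'net.ipv4.conf.',
--         'net.ipv6.conf.',
--         'net.ipv4.icmp_',
--         'net.ipv4.tcp_syncookies',
--     ],
--     'kernel_security': [
--         'kernel.randomize_va_space',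
--         'kernel.kptr_restrict',
--         'kernel.dmesg_restrict',
--         'kernel.perf_event_paranoid',
--         'kernel.yama.',
--         'kernel.sysrq',
--     ],
--     'memory': [
--         'vm.',
--         'kernel.shmmax',
--         'kernel.shmall',
--     ],
--     'network_performance': [
--         'net.core.',
--         'net.ipv4.tcp_',
--         'net.ipv4.udp_',
--     ],
--     'filesystem': [
--         'fs.',
--     ],
-- }
--
-- # The category table flattened once into (prefix, category) pairs, first match wins.
-- _CAT_PAIRS = [(prefix, category)
--               for category, prefixes in PARAM_CATEGORIES.items()
--               for prefix in prefixes]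
--
--
-- def _category(param):
--     return next((cat for prefix, cat in _CAT_PAIRS if param.startswith(prefix)), 'other')
--
--
-- def _norm(value):
--     return ' '.join(str(value).split())
--
--
-- def compare_sysctls(current, baseline, ignore_extra=False):
--     """Compare current sysctls against baseline."""
--     changed = [
--         {'key': k, 'expected': v, 'actual': current[k], 'category': _category(k)}
--         for k, v in baseline.items()
--         if k in current and _norm(current[k]) != _norm(v)
--     ]
--     missing = [
--         {'key': k, 'expected': v, 'category': _category(k)}
--         for k, v in baseline.items()
--         if k not in current
--     ]
--     extra = []
--     if not ignore_extra:
--         # Index the baseline prefix families once: a current key is in some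
--         # family iff one of its length-L cuts is in the prefix set.
--         prefixes = {'.'.join(k.split('.')[:2]) for k in baseline}
--         lengths = sorted({len(p) for p in prefixes})
--         extra = [
--             {'key': k, 'value': v, 'category': _category(k)}
--             for k, v in current.items()
--             if k not in baseline and any(k[:n] in prefixes for n in lengths)
--         ]
--     return {'changed': changed, 'missing': missing, 'extra': extra}
-- ===== Notes on version B (the rewrite author's own statement) =====
-- stated objective: faster
-- what changed: B replaces A's inner scan over every baseline key (per extra current key) by a prefix-family set built once and probed with one hash lookup per distinct prefix length, and builds changed/missing/extra by separate filter passes instead of one interleaved accumulator loop; the category table is flattened once into (prefix, category) pairs.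
import Mathlib
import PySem

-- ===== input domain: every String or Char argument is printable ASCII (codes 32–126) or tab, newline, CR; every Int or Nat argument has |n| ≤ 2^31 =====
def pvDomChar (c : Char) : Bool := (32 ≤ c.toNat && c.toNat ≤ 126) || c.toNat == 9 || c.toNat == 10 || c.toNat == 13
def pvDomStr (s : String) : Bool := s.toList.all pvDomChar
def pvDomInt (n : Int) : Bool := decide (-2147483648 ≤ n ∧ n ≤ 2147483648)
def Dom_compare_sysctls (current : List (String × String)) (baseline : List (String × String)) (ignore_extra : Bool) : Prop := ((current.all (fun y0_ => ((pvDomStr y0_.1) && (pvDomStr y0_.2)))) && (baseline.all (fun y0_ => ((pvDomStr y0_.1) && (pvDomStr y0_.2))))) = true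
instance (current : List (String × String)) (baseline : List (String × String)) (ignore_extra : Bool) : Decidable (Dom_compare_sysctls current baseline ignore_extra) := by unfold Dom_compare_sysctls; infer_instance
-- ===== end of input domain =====

-- B replaces A's per-current-key scan over all baseline keys by a prefix set indexed by the distinct
-- prefix lengths, and builds the changed/missing/extra lists by separate filter passes (objective: faster).


-- '.'.join(key.split('.')[:2]) — the prefix family of a baseline key (used by both Pythons verbatim).
-- The separator "." is nonempty, so split? is always `some`; the `getD []` default is never taken.
def pvPrefix2 (bk : String) : String :=
  PySem.Str.join "." (PySem.List.slice ((PySem.Str.split? bk ".").getD []) none (some 2))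

-- ===== PORT A =====
def pvParamCategories : List (String × List String) :=
  [("network_security",
      ["net.ipv4.conf.", "net.ipv6.conf.", "net.ipv4.icmp_", "net.ipv4.tcp_syncookies"]),
   ("kernel_security",
      ["kernel.randomize_va_space", "kernel.kptr_restrict", "kernel.dmesg_restrict",
       "kernel.perf_event_paranoid", "kernel.yama.", "kernel.sysrq"]),
   ("memory", ["vm.", "kernel.shmmax", "kernel.shmall"]),
   ("network_performance", ["net.core.", "net.ipv4.tcp_", "net.ipv4.udp_"]),
   ("filesystem", ["fs."])]

-- A's get_category: scan the category table, first category one of whose prefixes matches.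
def get_category_loop (param : String) : List (String × List String) → String
  | [] => "other"
  | (category, prefixes) :: rest =>
      if prefixes.any (fun pre => PySem.Str.startswith param pre) then category
      else get_category_loop param rest

def get_category (param : String) : String := get_category_loop param pvParamCategories

def compare_sysctls (current : List (String × String)) (baseline : List (String × String)) (ignore_extra : Bool) : List (String × List (List (String × String))) :=
  let cur := PySem.Dict.ofList current
  let base := PySem.Dict.ofList baseline
  -- one loop over baseline.items() filling drift['changed'] and drift['missing']
  let cm := base.items.foldl
    (fun (cm : List (List (String × String)) × List (List (String × String))) kv =>
      match cur.get? kv.1 with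
      | some current_value =>
          if PySem.Str.join " " (PySem.Str.split₀ current_value) ≠ PySem.Str.join " " (PySem.Str.split₀ kv.2) then
            (cm.1 ++ [[("key", kv.1), ("expected", kv.2), ("actual", current_value),
                       ("category", get_category kv.1)]], cm.2)
          else cm
      | none =>
          (cm.1, cm.2 ++ [[("key", kv.1), ("expected", kv.2), ("category", get_category kv.1)]]))
    ([], [])
  let extra :=
    if !ignore_extra then
      let baseline_keys := PySem.Set.ofList base.keys
      cur.items.foldl
        (fun ex kv =>
          if !(PySem.Set.contains baseline_keys kv.1) then
            -- inner scan over the whole baseline key set, break on first prefix-family hit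
            if baseline_keys.any (fun bk => PySem.Str.startswith kv.1 (pvPrefix2 bk)) then
              ex ++ [[("key", kv.1), ("value", kv.2), ("category", get_category kv.1)]]
            else ex
          else ex) []
    else []
  [("changed", cm.1), ("missing", cm.2), ("extra", extra)]

-- ===== PORT B =====
-- the category table flattened once into (prefix, category) pairs, first match wins
def pvCatPairs : List (String × String) :=
  [("net.ipv4.conf.", "network_security"), ("net.ipv6.conf.", "network_security"),
   ("net.ipv4.icmp_", "network_security"), ("net.ipv4.tcp_syncookies", "network_security"),
   ("kernel.randomize_va_space", "kernel_security"), ("kernel.kptr_restrict", "kernel_security"),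
   ("kernel.dmesg_restrict", "kernel_security"), ("kernel.perf_event_paranoid", "kernel_security"),
   ("kernel.yama.", "kernel_security"), ("kernel.sysrq", "kernel_security"),
   ("vm.", "memory"), ("kernel.shmmax", "memory"), ("kernel.shmall", "memory"),
   ("net.core.", "network_performance"), ("net.ipv4.tcp_", "network_performance"),
   ("net.ipv4.udp_", "network_performance"), ("fs.", "filesystem")]

def pvCategory (param : String) : String :=
  ((pvCatPairs.find? (fun pc => PySem.Str.startswith param pc.1)).map (fun pc => pc.2)).getD "other"

def pvNorm (v : String) : String := PySem.Str.join " " (PySem.Str.split₀ v)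

def compare_sysctls_alt (current : List (String × String)) (baseline : List (String × String)) (ignore_extra : Bool) : List (String × List (List (String × String))) :=
  let cur := PySem.Dict.ofList current
  let base := PySem.Dict.ofList baseline
  let changed := base.items.filterMap (fun kv =>
    match cur.get? kv.1 with
    | some cv =>
        if pvNorm cv ≠ pvNorm kv.2 then
          some [("key", kv.1), ("expected", kv.2), ("actual", cv), ("category", pvCategory kv.1)]
        else none
    | none => none)
  let missing := (base.items.filter (fun kv => !(cur.contains kv.1))).map
    (fun kv => [("key", kv.1), ("expected", kv.2), ("category", pvCategory kv.1)])
  let extra :=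
    if ignore_extra then []
    else
      -- index the baseline prefix families once; membership test = one cut per distinct length
      let prefixes : PySem.Set String := PySem.Set.ofList (base.keys.map pvPrefix2)
      let lengths := PySem.List.sorted (PySem.Set.ofList (prefixes.map PySem.Str.len)) (fun n => n) false
      (cur.items.filter (fun kv =>
          !(base.contains kv.1) &&
          lengths.any (fun n => PySem.Set.contains prefixes (PySem.Str.slice kv.1 none (some n))))).map
        (fun kv => [("key", kv.1), ("value", kv.2), ("category", pvCategory kv.1)])
  [("changed", changed), ("missing", missing), ("extra", extra)]

-- ===== PRECONDITION & SPEC =====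
def Spec_compare_sysctls (current : List (String × String)) (baseline : List (String × String)) (ignore_extra : Bool) (out : List (String × List (List (String × String)))) : Prop := out = compare_sysctls_alt current baseline ignore_extra
instance (current : List (String × String)) (baseline : List (String × String)) (ignore_extra : Bool) (out : List (String × List (List (String × String)))) : Decidable (Spec_compare_sysctls current baseline ignore_extra out) := by unfold Spec_compare_sysctls; infer_instance

-- ===== CLAIM (what is proved, stated in full; the proofs are below) =====
def Claim_equal_compare_sysctls : Prop := ∀ (current : List (String × String)) (baseline : List (String × String)) (ignore_extra : Bool), Dom_compare_sysctls current baseline ignore_extra → Spec_compare_sysctls current baseline ignore_extra (compare_sysctls current baseline ignore_extra)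

-- ===== LEMMAS AND PROOFS =====

-- A's nested category scan = first match over the flattened (prefix, category) table
lemma get_category_loop_eq (param : String) (l : List (String × List String)) :
    get_category_loop param l =
      (((l.flatMap (fun cp => cp.2.map (fun p => (p, cp.1)))).find?
          (fun pc => PySem.Str.startswith param pc.1)).map (fun pc => pc.2)).getD "other" := by
  induction l with
  | nil => rfl
  | cons hd tl ih =>
    obtain ⟨cat, ps⟩ := hd
    rw [List.flatMap_cons, List.find?_append, List.find?_map]
    by_cases h : ps.any (fun pre => PySem.Str.startswith param pre) = true
    · obtain ⟨p, hp, hsw⟩ := List.any_eq_true.mp h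
      simp only [get_category_loop, h, if_true]
      cases hfind : List.find? ((fun pc => PySem.Str.startswith param pc.1) ∘ (fun p => (p, cat))) ps with
      | none => exact absurd hsw (List.find?_eq_none.mp hfind p hp)
      | some q => simp
    · have hfind : List.find? ((fun pc => PySem.Str.startswith param pc.1) ∘ (fun p => (p, cat))) ps = none := by
        rw [List.find?_eq_none]
        intro x hx
        simp only [Function.comp]
        intro hc
        exact h (List.any_eq_true.mpr ⟨x, hx, hc⟩)
      simp only [get_category_loop, h, hfind, Option.map_none, Option.or, ih]
      simp

lemma cat_pairs_flat :
    pvParamCategories.flatMap (fun cp => cp.2.map (fun p => (p, cp.1))) = pvCatPairs := rfl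

lemma category_eq (param : String) : get_category param = pvCategory param := by
  rw [get_category, get_category_loop_eq, cat_pairs_flat, pvCategory]

-- key[:len(p)] recovers p when key starts with p
lemma slice_len_of_startswith (key p : String) (h : PySem.Str.startswith key p = true) :
    PySem.Str.slice key none (some (PySem.Str.len p)) = p := by
  rw [← String.toList_inj, PySem.Str.toList_slice, PySem.Chars.slice_eq_listSlice,
      PySem.Str.len_eq, PySem.List.slice_to _ (by positivity)]
  rw [PySem.Str.startswith_eq] at h
  have hpre : p.toList <+: key.toList := (PySem.Chars.startswith_iff _ _).mp h
  simpa using (List.prefix_iff_eq_take.mp hpre).symm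

-- a key always starts with its own cut
lemma startswith_slice (key : String) (n : Int) (hn : 0 ≤ n) :
    PySem.Str.startswith key (PySem.Str.slice key none (some n)) = true := by
  rw [PySem.Str.startswith_eq, PySem.Chars.startswith_iff, PySem.Str.toList_slice,
      PySem.Chars.slice_eq_listSlice, PySem.List.slice_to _ hn]
  exact List.take_prefix _ _

-- the prefix-family test: scanning all baseline keys = cutting the key at each distinct prefix length
lemma any_prefix_eq (bkeys : List String) (key : String) :
    (PySem.Set.ofList bkeys).any (fun bk => PySem.Str.startswith key (pvPrefix2 bk)) =
      (PySem.List.sorted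
          (PySem.Set.ofList ((PySem.Set.ofList (bkeys.map pvPrefix2)).map PySem.Str.len))
          (fun n => n) false).any
        (fun n => PySem.Set.contains (PySem.Set.ofList (bkeys.map pvPrefix2))
            (PySem.Str.slice key none (some n))) := by
  rw [Bool.eq_iff_iff, List.any_eq_true, List.any_eq_true]
  constructor
  · rintro ⟨bk, hbk, hsw⟩
    have hbk' : bk ∈ bkeys := (PySem.Set.mem_ofList _ _).mp hbk
    refine ⟨PySem.Str.len (pvPrefix2 bk), ?_, ?_⟩
    · rw [PySem.List.mem_sorted, PySem.Set.mem_ofList]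
      exact List.mem_map_of_mem ((PySem.Set.mem_ofList _ _).mpr (List.mem_map_of_mem hbk'))
    · rw [PySem.Set.contains_iff, PySem.Set.mem_ofList, slice_len_of_startswith key _ hsw]
      exact List.mem_map_of_mem hbk'
  · rintro ⟨n, hn, hc⟩
    rw [PySem.List.mem_sorted, PySem.Set.mem_ofList] at hn
    obtain ⟨p, hp, rfl⟩ := List.mem_map.mp hn
    rw [PySem.Set.contains_iff, PySem.Set.mem_ofList] at hc
    obtain ⟨bk, hbk, hq⟩ := List.mem_map.mp hc
    refine ⟨bk, (PySem.Set.mem_ofList _ _).mpr hbk, ?_⟩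
    rw [hq]
    exact startswith_slice key _ (by rw [PySem.Str.len_eq]; positivity)

-- A's nested ifs in the extra loop, as a single guard
lemma step_combine {α β : Type} (P Q : α → Bool) (f : α → β) :
    (fun (ex : List β) kv => if P kv then (if Q kv then ex ++ [f kv] else ex) else ex)
      = fun ex kv => if (P kv && Q kv) then ex ++ [f kv] else ex := by
  funext ex kv
  cases hP : P kv <;> cases hQ : Q kv <;> simp

-- A's single pass over baseline.items() with a pair accumulator = B's two filter passes
lemma cm_fold (cur : PySem.Dict String String)
    (g : String × String → String → List (String × String))
    (h : String × String → List (String × String))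
    (cond : String → String → Prop) [inst : ∀ a b, Decidable (cond a b)]
    (l : List (String × String)) (c m : List (List (String × String))) :
    l.foldl (fun cm kv =>
        match cur.get? kv.1 with
        | some cv => if cond cv kv.2 then (cm.1 ++ [g kv cv], cm.2) else cm
        | none => (cm.1, cm.2 ++ [h kv])) (c, m)
      = (c ++ l.filterMap (fun kv =>
            match cur.get? kv.1 with
            | some cv => if cond cv kv.2 then some (g kv cv) else none
            | none => none),
         m ++ (l.filter (fun kv => !(cur.contains kv.1))).map h) := by
  induction l generalizing c m with
  | nil => simp
  | cons kv tl ih =>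
    have hcont : cur.contains kv.1 = (cur.get? kv.1).isSome := PySem.Dict.contains_eq_isSome_get? _ _
    cases hget : cur.get? kv.1 with
    | some cv =>
      by_cases hc : cond cv kv.2
      · simp only [List.foldl_cons, List.filterMap_cons, List.filter_cons, hget, hc, if_true,
          hcont, Option.isSome_some, Bool.not_true, ih]
        simp
      · simp only [List.foldl_cons, List.filterMap_cons, List.filter_cons, hget, hc, if_false,
          hcont, ih]
        simp
    | none =>
      simp only [List.foldl_cons, List.filterMap_cons, List.filter_cons, hget, hcont,
        Option.isSome_none, Bool.not_false, if_true, ih]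
      simp

-- set-of-keys membership = dict membership
lemma set_keys_contains (base : PySem.Dict String String) (k : String) :
    PySem.Set.contains (PySem.Set.ofList base.keys) k = base.contains k := by
  rw [Bool.eq_iff_iff, PySem.Set.contains_iff, PySem.Set.mem_ofList]
  exact (PySem.Dict.contains_iff_mem_keys _ _).symm

-- ===== VERDICT (by name: the statement is the Claim_ definition above) =====
theorem compare_sysctls_spec : Claim_equal_compare_sysctls := by
  intro current baseline ignore_extra _hdom
  unfold Spec_compare_sysctls
  simp only [compare_sysctls, compare_sysctls_alt, category_eq, pvNorm]
  rw [cm_fold (PySem.Dict.ofList current)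
        (fun kv cv => [("key", kv.1), ("expected", kv.2), ("actual", cv), ("category", pvCategory kv.1)])
        (fun kv => [("key", kv.1), ("expected", kv.2), ("category", pvCategory kv.1)])
        (fun a b => PySem.Str.join " " (PySem.Str.split₀ a) ≠ PySem.Str.join " " (PySem.Str.split₀ b))]
  cases ignore_extra with
  | true =>
    simp only [List.nil_append, Bool.not_true, Bool.false_eq_true, if_false, if_true]
    rfl
  | false =>
    simp only [Bool.not_false, if_true]
    rw [step_combine
          (fun kv : String × String =>
            !(PySem.Set.contains (PySem.Set.ofList (PySem.Dict.ofList baseline).keys) kv.1))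
          (fun kv : String × String =>
            (PySem.Set.ofList (PySem.Dict.ofList baseline).keys).any
              (fun bk => PySem.Str.startswith kv.1 (pvPrefix2 bk)))
          (fun kv => [("key", kv.1), ("value", kv.2), ("category", pvCategory kv.1)])]
    rw [PySem.List.foldl_append_if]
    simp only [set_keys_contains, any_prefix_eq, List.nil_append]
    rfl
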